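-- pv_equiv track=rewrite | github.com/tomconte/tetrice | tools/encode_phc25.py | find_good_mask
-- ===== SOURCE A (Python) =====
-- def find_good_mask(binary_data):
--     """Find XOR mask that eliminates consecutive zeros."""
--     for mask in range(1, 256):
--         has_consecutive_zeros = False
--         previous_byte = None
--
--         for byte in binary_data:
--             encoded_byte = byte ^ mask
--
--             if encoded_byte == 0x00 and previous_byte == 0x00:
--                 has_consecutive_zeros = True
--                 break
--
--             previous_byte = encoded_byte
--
--         if not has_consecutive_zeros:
--             return mask
--
--     return None
-- ===== SOURCE B (Python) =====
-- def find_good_mask(binary_data):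
--     """Find XOR mask that eliminates consecutive zeros."""
--     bad = {a for a, b in zip(binary_data, binary_data[1:]) if a == b}
--     for mask in range(1, 256):
--         if mask not in bad:
--             return mask
--     return None
-- ===== Notes on version B (the rewrite author's own statement) =====
-- stated objective: simpler
-- what changed: Instead of rescanning the whole data for each of the 255 candidate masks, B collects in one pass the set of values of adjacent equal byte pairs (the only masks that can produce consecutive zeros) and returns the smallest mask in 1..255 not in that set.
import Mathlib
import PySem

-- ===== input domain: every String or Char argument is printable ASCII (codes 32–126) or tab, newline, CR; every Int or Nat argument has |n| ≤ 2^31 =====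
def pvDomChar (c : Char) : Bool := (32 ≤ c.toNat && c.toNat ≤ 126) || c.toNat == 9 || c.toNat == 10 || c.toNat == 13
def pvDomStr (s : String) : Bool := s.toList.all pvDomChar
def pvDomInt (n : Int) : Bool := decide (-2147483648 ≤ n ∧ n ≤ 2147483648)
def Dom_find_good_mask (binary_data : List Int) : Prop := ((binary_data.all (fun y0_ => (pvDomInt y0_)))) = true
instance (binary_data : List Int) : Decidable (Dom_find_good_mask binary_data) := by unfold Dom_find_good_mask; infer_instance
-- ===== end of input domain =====

-- B replaces the per-mask rescan with one pass collecting the values of adjacent equal byte pairs, then picks the smallest mask in 1..255 not among them (objective: simpler).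


-- ===== PORT A =====
-- inner loop of A: 'for byte in binary_data: …' with state previous_byte; returns has_consecutive_zeros
def pvAInner (mask : Int) : List Int → Option Int → Bool
  | [], _ => false
  | b :: rest, prev =>
    let encoded := PySem.Int.bxor b mask
    if encoded = 0 ∧ prev = some 0 then true else pvAInner mask rest (some encoded)

-- outer loop of A: 'for mask in range(1, 256): … if not has_consecutive_zeros: return mask'
def pvAOuter (binary_data : List Int) : List Int → Option Int
  | [] => none
  | m :: ms => if pvAInner m binary_data none = false then some m else pvAOuter binary_data ms

def find_good_mask (binary_data : List Int) : Option Int :=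
  pvAOuter binary_data (PySem.List.pyRange 1 256 1)

-- ===== PORT B =====
-- the set comprehension {a for a, b in zip(data, data[1:]) if a == b}
def pvBad (binary_data : List Int) : PySem.Set Int :=
  PySem.Set.ofList
    (((binary_data.zip (binary_data.drop 1)).filter (fun p => p.1 == p.2)).map Prod.fst)

-- 'for mask in range(1, 256): if mask not in bad: return mask'
def pvBLoop (bad : PySem.Set Int) : List Int → Option Int
  | [] => none
  | m :: ms => if ¬ (PySem.Set.contains bad m = true) then some m else pvBLoop bad ms

def find_good_mask_alt (binary_data : List Int) : Option Int :=
  pvBLoop (pvBad binary_data) (PySem.List.pyRange 1 256 1)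

-- ===== PRECONDITION & SPEC =====
def Spec_find_good_mask (binary_data : List Int) (out : Option Int) : Prop := out = find_good_mask_alt binary_data
instance (binary_data : List Int) (out : Option Int) : Decidable (Spec_find_good_mask binary_data out) := by unfold Spec_find_good_mask; infer_instance

-- ===== CLAIM (what is proved, stated in full; the proofs are below) =====
def Claim_equal_find_good_mask : Prop := ∀ (binary_data : List Int), Dom_find_good_mask binary_data → Spec_find_good_mask binary_data (find_good_mask binary_data)

-- ===== LEMMAS AND PROOFS =====

theorem pv_bxor_eq_zero (a m : Int) : PySem.Int.bxor a m = 0 ↔ a = m := by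
  simp only [PySem.Int.bxor]
  split_ifs with ha hb hb
  · constructor
    · intro h
      have := Nat.xor_eq_zero_iff.mp (by exact_mod_cast h)
      omega
    · rintro rfl; simp
  · constructor
    · intro h; omega
    · intro h; omega
  · constructor
    · intro h; omega
    · intro h; omega
  · constructor
    · intro h
      have := Nat.xor_eq_zero_iff.mp (by exact_mod_cast h)
      omega
    · rintro rfl; simp

theorem pvAInner_iff (m : Int) (bs : List Int) (prev : Option Int) :
    pvAInner m bs prev = true ↔
      ((prev = some 0 ∧ bs.head? = some m) ∨
        ∃ p ∈ bs.zip (bs.drop 1), p.1 = m ∧ p.2 = m) := by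
  induction bs generalizing prev with
  | nil => simp [pvAInner]
  | cons b rest ih =>
    cases rest with
    | nil =>
      simp [pvAInner, pv_bxor_eq_zero, and_comm]
    | cons c rest' =>
      rw [pvAInner]
      simp only [List.drop_succ_cons, List.drop_zero, List.zip_cons_cons, List.head?_cons]
      by_cases hb : PySem.Int.bxor b m = 0 ∧ prev = some 0
      · rw [if_pos hb]
        have hbm : b = m := (pv_bxor_eq_zero b m).mp hb.1
        simp [hb.2, hbm]
      · rw [if_neg hb]
        rw [ih (some (PySem.Int.bxor b m))]
        constructor
        · rintro (⟨h0, hc⟩ | ⟨p, hp, h⟩)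
          · have hbm : b = m := (pv_bxor_eq_zero b m).mp (by injection h0)
            refine Or.inr ⟨(b, c), List.mem_cons_self, hbm, by simpa using hc⟩
          · refine Or.inr ⟨p, List.mem_cons_of_mem _ (by simpa using hp), h⟩
        · rintro (⟨h0, hc⟩ | ⟨p, hp, h1, h2⟩)
          · exact absurd ⟨(pv_bxor_eq_zero b m).mpr (by simpa using hc), h0⟩ hb
          · rcases List.mem_cons.mp hp with rfl | hp'
            · simp only at h1 h2
              exact Or.inl ⟨by simp [h1], by simp [h2]⟩
            · exact Or.inr ⟨p, by simpa using hp', h1, h2⟩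

theorem pv_inner_eq_contains (bs : List Int) (m : Int) :
    pvAInner m bs none = PySem.Set.contains (pvBad bs) m := by
  rcases h : PySem.Set.contains (pvBad bs) m with _ | _
  · rw [Bool.eq_false_iff]
    intro hc
    rcases (pvAInner_iff m bs none).mp hc with ⟨h0, _⟩ | ⟨p, hp, h1, h2⟩
    · simp at h0
    · have hm : m ∈ pvBad bs := by
        rw [pvBad, PySem.Set.mem_ofList]
        exact List.mem_map.mpr ⟨p, List.mem_filter.mpr ⟨hp, by simp [h1, h2]⟩, h1⟩
      rw [(PySem.Set.contains_iff _ _).mpr hm] at h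
      exact Bool.noConfusion h
  · have hm : m ∈ pvBad bs := (PySem.Set.contains_iff _ _).mp h
    rw [pvBad, PySem.Set.mem_ofList] at hm
    rcases List.mem_map.mp hm with ⟨p, hpf, hfst⟩
    rcases List.mem_filter.mp hpf with ⟨hp, heq⟩
    refine (pvAInner_iff m bs none).mpr (Or.inr ⟨p, hp, hfst, ?_⟩)
    have h12 : p.1 = p.2 := by simpa using heq
    omega

theorem pv_loops_eq (bs : List Int) (ms : List Int) :
    pvAOuter bs ms = pvBLoop (pvBad bs) ms := by
  induction ms with
  | nil => rfl
  | cons m ms ih =>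
    rw [pvAOuter, pvBLoop, pv_inner_eq_contains, ih]
    rcases PySem.Set.contains (pvBad bs) m with _ | _ <;> simp

-- ===== VERDICT (by name: the statement is the Claim_ definition above) =====
theorem find_good_mask_spec : Claim_equal_find_good_mask := by
  intro bs _
  show find_good_mask bs = find_good_mask_alt bs
  rw [find_good_mask, find_good_mask_alt, pv_loops_eq]
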